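-- pv_equiv track=rewrite | github.com/Lexxx42/Introduction_to_programming_languages | Python programming course_STEP/5_lists/hw2.py | sum_neighbor
-- ===== SOURCE A (Python) =====
-- def sum_neighbor(in_list):
--     out_list = []
--     if len(in_list) == 1:
--         out_list.append(in_list[0])
--         return out_list
--     else:
--         for i in range(len(in_list)):
--             if i < len(in_list)-1:
--                 out_list.append(in_list[i+1]+in_list[i-1])
--             else:
--                 out_list.append(in_list[i-1]+in_list[0])
--         return out_list
-- ===== SOURCE B (Python) =====
-- def sum_neighbor(in_list):
--     if len(in_list) == 1:
--         return [in_list[0]]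
--     prev = in_list[-1:] + in_list[:-1]
--     nxt = in_list[1:] + in_list[:1]
--     return [p + n for p, n in zip(prev, nxt)]
-- ===== Notes on version B (the rewrite author's own statement) =====
-- stated objective: alternative
-- what changed: Replaces the index loop with its wrap-around branch by two cyclically rotated copies of the list summed pairwise with zip.
import Mathlib
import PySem

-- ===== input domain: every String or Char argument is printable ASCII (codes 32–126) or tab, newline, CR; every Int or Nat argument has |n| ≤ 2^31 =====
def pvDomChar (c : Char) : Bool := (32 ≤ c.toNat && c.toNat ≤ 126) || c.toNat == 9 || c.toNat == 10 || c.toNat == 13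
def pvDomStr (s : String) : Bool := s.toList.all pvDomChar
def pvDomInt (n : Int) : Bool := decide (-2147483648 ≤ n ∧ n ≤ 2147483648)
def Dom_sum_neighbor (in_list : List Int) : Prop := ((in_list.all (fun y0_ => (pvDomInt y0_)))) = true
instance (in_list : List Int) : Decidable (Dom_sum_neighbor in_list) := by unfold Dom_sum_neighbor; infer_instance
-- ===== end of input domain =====

-- B replaces A's index loop with its wrap-around branch by two cyclically rotated
-- copies of the list summed pairwise (objective: alternative decomposition).

-- ===== PORT A =====
-- literal transliteration: the for-loop over range(len) appends one sum per index;
-- all indexings are in range (i-1 = -1 at i=0 is Python's last element), so pyGetD is exact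
def sum_neighbor (in_list : List Int) : List Int :=
  if in_list.length = 1 then
    [PySem.List.pyGetD in_list 0 0]
  else
    (PySem.List.pyRange 0 (in_list.length : Int) 1).foldl
      (fun out_list i =>
        if i < (in_list.length : Int) - 1 then
          out_list ++ [PySem.List.pyGetD in_list (i + 1) 0 + PySem.List.pyGetD in_list (i - 1) 0]
        else
          out_list ++ [PySem.List.pyGetD in_list (i - 1) 0 + PySem.List.pyGetD in_list 0 0]) []

-- ===== PORT B =====
def sum_neighbor_alt (in_list : List Int) : List Int :=
  if in_list.length = 1 then
    [PySem.List.pyGetD in_list 0 0]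
  else
    let prev := PySem.List.slice in_list (some (-1)) none ++ PySem.List.slice in_list none (some (-1))
    let nxt := PySem.List.slice in_list (some 1) none ++ PySem.List.slice in_list none (some 1)
    (prev.zip nxt).map (fun p => p.1 + p.2)

-- ===== PRECONDITION & SPEC =====
def Spec_sum_neighbor (in_list : List Int) (out : List Int) : Prop := out = sum_neighbor_alt in_list
instance (in_list : List Int) (out : List Int) : Decidable (Spec_sum_neighbor in_list out) := by unfold Spec_sum_neighbor; infer_instance

-- ===== CLAIM (what is proved, stated in full; the proofs are below) =====
def Claim_equal_sum_neighbor : Prop := ∀ (in_list : List Int), Dom_sum_neighbor in_list → Spec_sum_neighbor in_list (sum_neighbor in_list)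

-- ===== LEMMAS AND PROOFS =====

theorem sum_neighbor_eq_alt (xs : List Int) : sum_neighbor xs = sum_neighbor_alt xs := by
  by_cases h1 : xs.length = 1
  · simp [sum_neighbor, sum_neighbor_alt, h1]
  · rcases eq_or_ne xs [] with rfl | hne
    · decide
    · have hn : 2 ≤ xs.length := by
        rcases xs with _ | ⟨a, _ | ⟨b, t⟩⟩ <;> simp_all
      unfold sum_neighbor sum_neighbor_alt
      rw [if_neg h1, if_neg h1]
      have hfun : (fun (out_list : List Int) (i : Int) =>
          if i < (xs.length : Int) - 1 then
            out_list ++ [PySem.List.pyGetD xs (i + 1) 0 + PySem.List.pyGetD xs (i - 1) 0]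
          else
            out_list ++ [PySem.List.pyGetD xs (i - 1) 0 + PySem.List.pyGetD xs 0 0])
        = (fun out_list i => out_list ++ [(fun i =>
            if i < (xs.length : Int) - 1 then
              PySem.List.pyGetD xs (i + 1) 0 + PySem.List.pyGetD xs (i - 1) 0
            else
              PySem.List.pyGetD xs (i - 1) 0 + PySem.List.pyGetD xs 0 0) i]) := by
        funext out i
        by_cases h : i < (xs.length : Int) - 1 <;> simp [h]
      rw [hfun, PySem.List.foldl_append_singleton_eq_map, List.nil_append,
          PySem.List.pyRange_one, List.map_map,
          PySem.List.slice_from_neg_one, PySem.List.slice_to_neg_one,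
          PySem.List.slice_from_one, PySem.List.slice_to xs (by norm_num)]
      apply List.ext_getElem
      · simp; omega
      · intro k hk hk'
        have hkn : k < xs.length := by simpa using hk
        rw [List.getElem_map, List.getElem_map, List.getElem_zip, List.getElem_range]
        simp only [Function.comp, zero_add]
        by_cases hklt : k < xs.length - 1
        · rw [if_pos (by omega)]
          have hBnxt : (xs.tail ++ List.take (1:Int).toNat xs)[k]'(by simp; omega)
              = xs[k + 1]'(by omega) := by
            rw [List.getElem_append]
            rw [dif_pos (by simp; omega)]
            exact List.getElem_tail _
          rcases Nat.eq_zero_or_pos k with rfl | hkpos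
          · have hA1 : PySem.List.pyGetD xs ((0:Nat) + 1 : Int) 0 = xs[1]'(by omega) := by
              rw [PySem.List.pyGetD_eq_getElem xs 0 (by norm_num) (by push_cast; omega)]
              simp
            have hA2 : PySem.List.pyGetD xs ((0:Nat) - 1 : Int) 0 = xs[xs.length - 1]'(by omega) := by
              rw [show ((0:Nat) - 1 : Int) = -1 by norm_num,
                  PySem.List.pyGetD_neg_one xs 0 hne, List.getLast_eq_getElem]
            have hBprev : (List.drop (xs.length - 1) xs ++ xs.dropLast)[0]'(by simp; omega)
                = xs[xs.length - 1]'(by omega) := by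
              rw [List.getElem_append, dif_pos (by simp; omega), List.getElem_drop]
              simp
            rw [hA1, hA2, hBprev, hBnxt]
            exact add_comm _ _
          · have hA1 : PySem.List.pyGetD xs ((k:Int) + 1) 0 = xs[k + 1]'(by omega) := by
              rw [PySem.List.pyGetD_eq_getElem xs 0 (by omega) (by omega)]
              congr 1
            have hA2 : PySem.List.pyGetD xs ((k:Int) - 1) 0 = xs[k - 1]'(by omega) := by
              rw [PySem.List.pyGetD_eq_getElem xs 0 (by omega) (by omega)]
              congr 1
              omega
            have hBprev : (List.drop (xs.length - 1) xs ++ xs.dropLast)[k]'(by simp; omega)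
                = xs[k - 1]'(by omega) := by
              rw [List.getElem_append, dif_neg (by simp; omega), List.getElem_dropLast]
              congr 1
              simp only [List.length_drop]
              omega
            rw [hA1, hA2, hBprev, hBnxt]
            exact add_comm _ _
        · -- k = xs.length - 1
          rw [if_neg (by omega)]
          have hA2 : PySem.List.pyGetD xs ((k:Int) - 1) 0 = xs[k - 1]'(by omega) := by
            rw [PySem.List.pyGetD_eq_getElem xs 0 (by omega) (by omega)]
            congr 1
            omega
          have hA0 : PySem.List.pyGetD xs 0 0 = xs[0]'(by omega) := by
            rw [PySem.List.pyGetD_eq_getElem xs 0 (by norm_num) (by omega)]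
            simp
          have hBprev : (List.drop (xs.length - 1) xs ++ xs.dropLast)[k]'(by simp; omega)
              = xs[k - 1]'(by omega) := by
            rw [List.getElem_append, dif_neg (by simp; omega), List.getElem_dropLast]
            congr 1
            simp only [List.length_drop]
            omega
          have hBnxt : (xs.tail ++ List.take (1:Int).toNat xs)[k]'(by simp; omega)
              = xs[0]'(by omega) := by
            rw [List.getElem_append, dif_neg (by simp; omega), List.getElem_take]
            congr 1
            simp only [List.length_tail]
            omega
          rw [hA2, hA0, hBprev, hBnxt]

-- ===== VERDICT (by name: the statement is the Claim_ definition above) =====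
theorem sum_neighbor_spec : Claim_equal_sum_neighbor := by
  intro xs _
  exact sum_neighbor_eq_alt xs
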